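-- pv_equiv track=rewrite | github.com/loickt/drone_swarm | 1_code/csv_processing/csvAssembler.py | hole_detection
-- ===== SOURCE A (Python) =====
-- def hole_detection(lst):
--     missing_numbers = []
--     start, end = lst[0], lst[-1]
--     for i in range(start, end+1):
--         if i not in lst:
--             missing_numbers.append(i)
--
--     sublists = []
--     start_index = 0
--     for i in range(len(missing_numbers) - 1):
--         if missing_numbers[i+1] != missing_numbers[i] + 1:
--             sublists.append(missing_numbers[start_index:i+1])
--             start_index = i+1
--     sublists.append(missing_numbers[start_index:])
--
--     return sublists
-- ===== SOURCE B (Python) =====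
-- def hole_detection(lst):
--     start, end = lst[0], lst[-1]
--     present = set(lst)
--     sublists = []
--     current = []
--     prev = 0
--     for i in range(start, end + 1):
--         if i not in present:
--             if current and i != prev + 1:
--                 sublists.append(current)
--                 current = []
--             current.append(i)
--             prev = i
--     sublists.append(current)
--     return sublists
-- ===== Notes on version B (the rewrite author's own statement) =====
-- stated objective: faster
-- what changed: Single fused pass over the range with an O(1) set membership test and a running current-run/prev accumulator, replacing A's two-phase build of a missing-numbers list scanned with 'i not in lst' (O(range*n)) and then regrouped by an index-and-slice loop.
import Mathlib
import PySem

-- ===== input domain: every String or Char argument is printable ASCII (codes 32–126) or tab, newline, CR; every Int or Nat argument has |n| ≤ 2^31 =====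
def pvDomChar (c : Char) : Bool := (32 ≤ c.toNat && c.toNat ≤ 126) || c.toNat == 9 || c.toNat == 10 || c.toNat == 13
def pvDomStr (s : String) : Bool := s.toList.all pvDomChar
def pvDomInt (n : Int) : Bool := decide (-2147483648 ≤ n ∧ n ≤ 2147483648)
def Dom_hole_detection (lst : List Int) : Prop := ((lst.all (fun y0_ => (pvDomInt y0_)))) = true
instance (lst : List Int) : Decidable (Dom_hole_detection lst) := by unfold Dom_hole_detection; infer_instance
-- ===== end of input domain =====

-- B fuses hole collection and run grouping into one pass over the range with a set
-- membership test, replacing A's two-phase missing-list build plus index/slice regrouping.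

-- ===== PORT A =====
def hole_detection (lst : List Int) : List (List Int) :=
  match PySem.List.pyGet? lst 0, PySem.List.pyGet? lst (-1) with
  | some start, some stop =>
    let missing := (PySem.List.pyRange start (stop + 1) 1).foldl
      (fun acc i => if i ∈ lst then acc else acc ++ [i]) []
    let st := (PySem.List.pyRange 0 ((missing.length : Int) - 1) 1).foldl
      (fun (st : List (List Int) × Int) i =>
        if PySem.List.pyGetD missing (i + 1) 0 ≠ PySem.List.pyGetD missing i 0 + 1 then
          (st.1 ++ [PySem.List.slice missing (some st.2) (some (i + 1))], i + 1)
        else st)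
      ([], 0)
    st.1 ++ [PySem.List.slice missing (some st.2) none]
  | _, _ => []

-- ===== PORT B =====
def hole_detection_alt (lst : List Int) : List (List Int) :=
  match PySem.List.pyGet? lst 0 with
  | none => []
  | some start =>
  match PySem.List.pyGet? lst (-1) with
  | none => []
  | some stop =>
    let present : PySem.Set Int := PySem.Set.ofList lst
    let st := (PySem.List.pyRange start (stop + 1) 1).foldl
      (fun (st : List (List Int) × List Int × Int) i =>
        if i ∈ present then st
        else
          let fl := if st.2.1 ≠ [] ∧ i ≠ st.2.2 + 1 then (st.1 ++ [st.2.1], ([] : List Int)) else (st.1, st.2.1)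
          (fl.1, fl.2 ++ [i], i))
      ([], [], 0)
    st.1 ++ [st.2.1]

-- ===== PRECONDITION & SPEC =====
-- Pre_ excludes only the empty list, on which A raises IndexError when reading the first element.
def Pre_hole_detection (lst : List Int) : Prop := lst ≠ []
instance (lst : List Int) : Decidable (Pre_hole_detection lst) := by unfold Pre_hole_detection; infer_instance
def pvWitness_hole_detection : List Int := [1, 5, 2]

def Spec_hole_detection (lst : List Int) (out : List (List Int)) : Prop := out = hole_detection_alt lst
instance (lst : List Int) (out : List (List Int)) : Decidable (Spec_hole_detection lst out) := by unfold Spec_hole_detection; infer_instance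

-- ===== CLAIM (what is proved, stated in full; the proofs are below) =====
def Claim_equal_hole_detection : Prop := ∀ (lst : List Int), Dom_hole_detection lst → Pre_hole_detection lst → Spec_hole_detection lst (hole_detection lst)

-- ===== LEMMAS AND PROOFS =====

-- B's grouping step (the missing-value branch of B's loop body).
def grpStep (st : List (List Int) × List Int × Int) (i : Int) : List (List Int) × List Int × Int :=
  if st.2.1 ≠ [] ∧ i ≠ st.2.2 + 1 then (st.1 ++ [st.2.1], [i], i)
  else (st.1, st.2.1 ++ [i], i)

-- B's fold body is 'skip if present, else grpStep'.
lemma stepB_eq (present : PySem.Set Int) (st : List (List Int) × List Int × Int) (i : Int) :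
    (fun (st : List (List Int) × List Int × Int) i =>
        if i ∈ present then st
        else
          let fl := if st.2.1 ≠ [] ∧ i ≠ st.2.2 + 1 then (st.1 ++ [st.2.1], ([] : List Int)) else (st.1, st.2.1)
          (fl.1, fl.2 ++ [i], i)) st i
      = if i ∈ present then st else grpStep st i := by
  by_cases h : i ∈ present <;> by_cases h2 : st.2.1 ≠ [] ∧ i ≠ st.2.2 + 1 <;>
    simp [grpStep, h, h2]

-- Fusing the membership skip with the grouping = grouping of the filtered list.
lemma fuse_filter (r : List Int) (p : Int → Prop) [DecidablePred p]
    (st : List (List Int) × List Int × Int) :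
    r.foldl (fun st i => if p i then st else grpStep st i) st
      = (r.filter (fun i => decide (¬ p i))).foldl grpStep st := by
  induction r generalizing st with
  | nil => rfl
  | cons x xs ih =>
      by_cases h : p x <;> simp [h, ih]

-- A's first loop builds exactly the filtered list.
lemma missA (r : List Int) (p : Int → Prop) [DecidablePred p] (acc : List Int) :
    r.foldl (fun acc i => if p i then acc else acc ++ [i]) acc
      = acc ++ r.filter (fun i => decide (¬ p i)) := by
  induction r generalizing acc with
  | nil => simp
  | cons x xs ih =>
      by_cases h : p x <;> simp [h, ih]

-- A's second-phase step over the missing list m.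
def idxStep (m : List Int) (st : List (List Int) × Int) (i : Int) : List (List Int) × Int :=
  if PySem.List.pyGetD m (i + 1) 0 ≠ PySem.List.pyGetD m i 0 + 1 then
    (st.1 ++ [PySem.List.slice m (some st.2) (some (i + 1))], i + 1)
  else st

-- Invariant relating A's index loop over range(j) to B's grouping of m.take (j+1).
lemma invAB (m : List Int) (j : Nat) (hm : j + 1 ≤ m.length) :
    ((PySem.List.pyRange 0 (j : Int) 1).foldl (idxStep m) ([], 0)).1
        = ((m.take (j + 1)).foldl grpStep ([], [], 0)).1 ∧
    ∃ k : Nat, ((PySem.List.pyRange 0 (j : Int) 1).foldl (idxStep m) ([], 0)).2 = (k : Int) ∧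
      k ≤ j ∧
      ((m.take (j + 1)).foldl grpStep ([], [], 0)).2.1 = (m.take (j + 1)).drop k ∧
      ((m.take (j + 1)).foldl grpStep ([], [], 0)).2.2 = m.getD j 0 := by
  induction j with
  | zero =>
      simp only [Nat.cast_zero]
      rw [PySem.List.pyRange_one_eq_nil (le_refl 0)]
      obtain ⟨x, xs, rfl⟩ : ∃ x xs, m = x :: xs := by
        cases m with
        | nil => simp at hm
        | cons x xs => exact ⟨x, xs, rfl⟩
      refine ⟨rfl, 0, rfl, le_refl 0, ?_, ?_⟩ <;> simp [grpStep]
  | succ j ih =>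
      obtain ⟨h1, k, hk, hkle, hcur, hprev⟩ := ih (by omega)
      have hj1 : j + 1 < m.length := by omega
      have hgj : m.getD j 0 = m[j] := List.getD_eq_getElem m 0 (by omega)
      have hgj1 : m.getD (j + 1) 0 = m[j + 1] := List.getD_eq_getElem m 0 hj1
      have htake : m.take (j + 1 + 1) = m.take (j + 1) ++ [m[j + 1]] := by
        rw [List.take_add_one]; simp [List.getElem?_eq_getElem hj1]
      have hlen : (m.take (j + 1)).length = j + 1 := by
        simp [List.length_take]; omega
      have hrange : PySem.List.pyRange 0 ((j + 1 : Nat) : Int) 1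
          = PySem.List.pyRange 0 (j : Int) 1 ++ [(j : Int)] := by
        push_cast
        exact PySem.List.pyRange_one_succ_right (by positivity)
      rw [hrange, htake, List.foldl_append, List.foldl_append]
      set a := (PySem.List.pyRange 0 (j : Int) 1).foldl (idxStep m) ([], 0) with ha
      set b := (m.take (j + 1)).foldl grpStep ([], [], 0) with hb
      simp only [List.foldl_cons, List.foldl_nil]
      have hcurne : b.2.1 ≠ [] := by
        rw [hcur]
        intro hnil
        have := congrArg List.length hnil
        simp [hlen] at this
        omega
      have hA : idxStep m a ((j : Int)) =
          if m[j + 1] ≠ m[j] + 1 then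
            (a.1 ++ [PySem.List.slice m (some a.2) (some ((j : Int) + 1))], (j : Int) + 1)
          else a := by
        simp only [idxStep]
        have e1 : PySem.List.pyGetD m ((j : Int) + 1) 0 = m[j + 1] := by
          rw [show ((j : Int) + 1) = ((j + 1 : Nat) : Int) by push_cast; ring]
          rw [PySem.List.pyGetD_natCast, hgj1]
        have e2 : PySem.List.pyGetD m ((j : Int)) 0 = m[j] := by
          rw [PySem.List.pyGetD_natCast, hgj]
        rw [e1, e2]
      have hB : grpStep b m[j + 1] =
          if m[j + 1] ≠ m[j] + 1 then (b.1 ++ [b.2.1], [m[j + 1]], m[j + 1])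
          else (b.1, b.2.1 ++ [m[j + 1]], m[j + 1]) := by
        simp only [grpStep, hprev, hgj, hcurne, ne_eq]
        by_cases hc : m[j + 1] = m[j] + 1 <;> simp [hc]
      rw [hA, hB]
      by_cases hc : m[j + 1] = m[j] + 1
      · simp only [hc, ne_eq, not_true_eq_false, if_false]
        refine ⟨h1, k, hk, by omega, ?_, ?_⟩
        · rw [hcur, List.drop_append_of_le_length (by omega)]
        · rw [hgj1]; exact hc.symm
      · have hslice : PySem.List.slice m (some a.2) (some ((j : Int) + 1))
            = (m.take (j + 1)).drop k := by
          rw [hk, show ((j : Int) + 1) = ((j + 1 : Nat) : Int) by push_cast; ring]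
          rw [PySem.List.slice_natCast, List.drop_take]
        simp only [hc, ne_eq, not_false_eq_true, if_true]
        refine ⟨?_, j + 1, by push_cast; ring, le_refl _, ?_, ?_⟩
        · rw [h1, hslice, hcur]
        · rw [List.drop_left' hlen]
        · rw [hgj1]

-- The whole second phase of A equals B's grouping pass, for any missing list m.
lemma phase2_eq (m : List Int) :
    ((PySem.List.pyRange 0 ((m.length : Int) - 1) 1).foldl (idxStep m) ([], 0)).1
      ++ [PySem.List.slice m
            (some ((PySem.List.pyRange 0 ((m.length : Int) - 1) 1).foldl (idxStep m) ([], 0)).2) none]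
      = (m.foldl grpStep ([], [], 0)).1 ++ [(m.foldl grpStep ([], [], 0)).2.1] := by
  cases m with
  | nil => decide
  | cons x xs =>
      have hcast : (((x :: xs).length : Int)) - 1 = ((xs.length : Nat) : Int) := by
        simp
      obtain ⟨h1, k, hk, hkle, hcur, hprev⟩ := invAB (x :: xs) xs.length (by simp)
      have htake : (x :: xs).take (xs.length + 1) = x :: xs := by
        apply List.take_of_length_le; simp
      rw [htake] at h1 hcur
      rw [hcast, h1, hk]
      rw [PySem.List.slice_from_natCast, hcur]

-- B's fold over r equals the grouping fold over the missing (filtered) values.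
lemma altB (lst : List Int) (r : List Int) (init : List (List Int) × List Int × Int) :
    r.foldl (fun (st : List (List Int) × List Int × Int) i =>
        if i ∈ PySem.Set.ofList lst then st
        else
          let fl := if st.2.1 ≠ [] ∧ i ≠ st.2.2 + 1 then (st.1 ++ [st.2.1], ([] : List Int)) else (st.1, st.2.1)
          (fl.1, fl.2 ++ [i], i)) init
      = (r.filter (fun i => decide (¬ i ∈ lst))).foldl grpStep init := by
  have hfun : (fun (st : List (List Int) × List Int × Int) i =>
        if i ∈ PySem.Set.ofList lst then st
        else
          let fl := if st.2.1 ≠ [] ∧ i ≠ st.2.2 + 1 then (st.1 ++ [st.2.1], ([] : List Int)) else (st.1, st.2.1)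
          (fl.1, fl.2 ++ [i], i))
      = fun st i => if i ∈ PySem.Set.ofList lst then st else grpStep st i := by
    funext st i; exact stepB_eq _ st i
  rw [hfun, fuse_filter r (fun i => i ∈ PySem.Set.ofList lst)]
  simp only [PySem.Set.mem_ofList]

-- ===== VERDICT (by name: the statement is the Claim_ definition above) =====
theorem hole_detection_spec : Claim_equal_hole_detection := by
  intro lst _ _
  unfold Spec_hole_detection
  simp only [hole_detection, hole_detection_alt]
  cases h0 : PySem.List.pyGet? lst 0 with
  | none => cases h1 : PySem.List.pyGet? lst (-1) <;> rfl
  | some start =>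
    cases h1 : PySem.List.pyGet? lst (-1) with
    | none => rfl
    | some stop =>
      simp only []
      rw [altB]
      rw [missA (PySem.List.pyRange start (stop + 1) 1) (fun i => i ∈ lst) []]
      rw [List.nil_append]
      exact phase2_eq _
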